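-- pv_equiv track=rewrite | github.com/skn11-algorithm/week04 | jub/5430.py | ac_function
-- ===== SOURCE A (Python) =====
-- from collections import deque
--
-- def ac_function(p, arr):
--     dq = deque(arr)  # 배열을 deque로 변환 (O(1))
--     reverse = False  # 뒤집기 상태 관리 변수
--
--     for cmd in p:  # 명령어 순회
--         if cmd == 'R':
--             reverse = not reverse  # 뒤집기 상태 변경
--         elif cmd == 'D':
--             if not dq:  # deque가 비어 있으면 error 출력
--                 return "error"
--             if reverse:
--                 dq.pop()  # 뒤집힌 상태라면 뒤에서 제거
--             else:
--                 dq.popleft()  # 일반 상태라면 앞에서 제거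
--
--     # 최종 결과 정리 (뒤집기 상태일 경우 한 번만 뒤집음)
--     result = list(dq)
--     if reverse:
--         result.reverse()
--
--     return "[" + ",".join(map(str, result)) + "]"
-- ===== SOURCE B (Python) =====
-- def ac_function(p, arr):
--     rev = False
--     front = back = 0
--     n = len(arr)
--     for cmd in p:
--         if cmd == 'R':
--             rev = not rev
--         elif cmd == 'D':
--             if front + back == n:
--                 return "error"
--             if rev:
--                 back += 1
--             else:
--                 front += 1
--     result = arr[front:n - back]
--     if rev:
--         result = result[::-1]
--     return "[" + ",".join(map(str, result)) + "]"
-- ===== Notes on version B (the rewrite author's own statement) =====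
-- stated objective: alternative
-- what changed: Replaced A's deque maintained per command (popleft/pop under a reverse flag) by a reverse flag plus front/back removal counters and one final slice of the original list.
import Mathlib
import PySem

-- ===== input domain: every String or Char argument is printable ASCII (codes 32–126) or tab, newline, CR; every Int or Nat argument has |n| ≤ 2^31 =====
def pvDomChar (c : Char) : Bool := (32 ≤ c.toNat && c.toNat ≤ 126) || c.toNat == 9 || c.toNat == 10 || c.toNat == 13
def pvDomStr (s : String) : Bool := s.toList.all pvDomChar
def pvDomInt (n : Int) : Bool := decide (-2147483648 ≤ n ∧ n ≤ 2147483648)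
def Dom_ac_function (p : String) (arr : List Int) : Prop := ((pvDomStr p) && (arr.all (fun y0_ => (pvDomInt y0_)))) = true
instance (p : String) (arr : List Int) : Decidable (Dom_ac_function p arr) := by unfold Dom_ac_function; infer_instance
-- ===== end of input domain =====

-- B replaces A's deque-with-reverse-flag by two integer counters plus the flag and a single
-- final slice (objective: alternative decomposition; per-command removals become counter arithmetic).

-- ===== PORT A =====
-- A's command loop: the deque is a List Int (popleft = tail, pop = dropLast); none = "error" return.
def acLoopA : List Char → List Int → Bool → Option (List Int × Bool)
  | [], dq, rev => some (dq, rev)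
  | c :: cs, dq, rev =>
    if c = 'R' then acLoopA cs dq (!rev)
    else if c = 'D' then
      if dq = [] then none
      else if rev then acLoopA cs dq.dropLast rev
      else acLoopA cs dq.tail rev
    else acLoopA cs dq rev

def ac_function (p : String) (arr : List Int) : String :=
  match acLoopA p.toList arr false with
  | none => "error"
  | some (dq, rev) =>
    let result := if rev then dq.reverse else dq
    "[" ++ PySem.Str.join "," (result.map PySem.Int.toStr) ++ "]"

-- ===== PORT B =====
-- B's command loop: no container, just the reverse flag and the front/back removal counters.
def acLoopB (n : Nat) : List Char → Bool → Nat → Nat → Option (Bool × Nat × Nat)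
  | [], rev, front, back => some (rev, front, back)
  | c :: cs, rev, front, back =>
    if c = 'R' then acLoopB n cs (!rev) front back
    else if c = 'D' then
      if front + back = n then none
      else if rev then acLoopB n cs rev front (back + 1)
      else acLoopB n cs rev (front + 1) back
    else acLoopB n cs rev front back

def ac_function_alt (p : String) (arr : List Int) : String :=
  let n := arr.length
  match acLoopB n p.toList false 0 0 with
  | none => "error"
  | some (rev, front, back) =>
    let result := PySem.List.slice arr (some (front : Int)) (some ((n : Int) - (back : Int)))
    let result := if rev then result.reverse else result
    "[" ++ PySem.Str.join "," (result.map PySem.Int.toStr) ++ "]"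

-- ===== PRECONDITION & SPEC =====
def Spec_ac_function (p : String) (arr : List Int) (out : String) : Prop := out = ac_function_alt p arr
instance (p : String) (arr : List Int) (out : String) : Decidable (Spec_ac_function p arr out) := by unfold Spec_ac_function; infer_instance

-- ===== CLAIM (what is proved, stated in full; the proofs are below) =====
def Claim_equal_ac_function : Prop := ∀ (p : String) (arr : List Int), Dom_ac_function p arr → Spec_ac_function p arr (ac_function p arr)

-- ===== LEMMAS AND PROOFS =====

theorem acDropLastTake (l : List Int) (k : Nat) (hk : k ≤ l.length) :
    (l.take k).dropLast = l.take (k - 1) := by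
  rw [List.dropLast_eq_take, List.length_take, List.take_take]
  congr 1
  omega

theorem acTailTake (l : List Int) (k f : Nat) :
    ((l.drop f).take k).tail = (l.drop (f + 1)).take (k - 1) := by
  rw [← List.drop_one, List.drop_take, List.drop_one, List.tail_drop]

theorem acLoop_agree (arr : List Int) (cs : List Char) :
    ∀ (rev : Bool) (front back : Nat), front + back ≤ arr.length →
    acLoopA cs ((arr.drop front).take (arr.length - front - back)) rev =
      (acLoopB arr.length cs rev front back).map
        (fun s => ((arr.drop s.2.1).take (arr.length - s.2.1 - s.2.2), s.1)) := by
  induction cs with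
  | nil => intro rev front back h; simp [acLoopA, acLoopB]
  | cons c cs ih =>
    intro rev front back h
    by_cases hR : c = 'R'
    · simp only [acLoopA, acLoopB, if_pos hR]
      exact ih (!rev) front back h
    · by_cases hD : c = 'D'
      · simp only [acLoopA, acLoopB, if_neg hR, if_pos hD]
        have hlen : ((arr.drop front).take (arr.length - front - back)).length
            = arr.length - front - back := by
          rw [List.length_take, List.length_drop]; omega
        by_cases he : front + back = arr.length
        · have : (arr.drop front).take (arr.length - front - back) = [] := by
            rw [List.eq_nil_iff_length_eq_zero, hlen]; omega
          simp [this, he]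
        · have hne : (arr.drop front).take (arr.length - front - back) ≠ [] := by
            rw [← List.length_pos_iff, hlen]; omega
          simp only [if_neg hne, if_neg he]
          cases rev with
          | true =>
            have := ih true front (back + 1) (by omega)
            rw [acDropLastTake _ _ (by rw [List.length_drop]; omega)]
            have harith : arr.length - front - back - 1 = arr.length - front - (back + 1) := by omega
            rw [harith]; exact this
          | false =>
            simp only [Bool.false_eq_true, if_neg (by simp : ¬False)]
            have := ih false (front + 1) back (by omega)
            rw [acTailTake]
            have harith : arr.length - front - back - 1 = arr.length - (front + 1) - back := by omega
            rw [harith]; exact this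
      · simp only [acLoopA, acLoopB, if_neg hR, if_neg hD]
        exact ih rev front back h

theorem acLoopB_bound (n : Nat) (cs : List Char) :
    ∀ (rev : Bool) (front back : Nat), front + back ≤ n →
    ∀ s, acLoopB n cs rev front back = some s → s.2.1 + s.2.2 ≤ n := by
  induction cs with
  | nil =>
    intro rev front back h s hs
    simp only [acLoopB, Option.some.injEq] at hs
    subst hs; exact h
  | cons c cs ih =>
    intro rev front back h s hs
    simp only [acLoopB] at hs
    split_ifs at hs with h1 h2 h3 h4
    · exact ih _ _ _ h s hs
    · exact ih _ _ _ (by omega) s hs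
    · exact ih _ _ _ (by omega) s hs
    · exact ih _ _ _ h s hs

-- ===== VERDICT (by name: the statement is the Claim_ definition above) =====
theorem ac_function_spec : Claim_equal_ac_function := by
  intro p arr _
  unfold Spec_ac_function ac_function ac_function_alt
  have key := acLoop_agree arr p.toList false 0 0 (by omega)
  simp only [List.drop_zero, Nat.sub_zero, List.take_length] at key
  rw [key]
  cases hB : acLoopB arr.length p.toList false 0 0 with
  | none => simp [hB]
  | some s =>
    obtain ⟨rev, front, back⟩ := s
    have hb : front + back ≤ arr.length := acLoopB_bound arr.length p.toList false 0 0 (by omega) _ hB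
    have hslice : PySem.List.slice arr (some (front : Int)) (some ((arr.length : Int) - (back : Int)))
        = (arr.drop front).take (arr.length - front - back) := by
      have hcast : ((arr.length : Int) - (back : Int)) = ((arr.length - back : Nat) : Int) := by
        omega
      rw [hcast, PySem.List.slice_natCast]
      congr 1
      omega
    simp only [hB, Option.map_some, hslice]
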